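-- pv_equiv track=rewrite | github.com/Rfam/rfam-msa-qa | scripts/fixable_errors.py | find_duplicates_from_entries
-- ===== SOURCE A (Python) =====
-- def parse_sequence_identifier(seq_name):
--     """
--     Parse sequence identifier to extract accession and coordinates.
--
--     Format: ACCESSION/START-END (e.g., AF228364.1/1-74)
--
--     Args:
--         seq_name: Sequence identifier string
--
--     Returns:
--         tuple: (accession, coordinates) or (seq_name, None) if no coordinates found
--     """
--     if '/' in seq_name:
--         parts = seq_name.split('/', 1)
--         return parts[0], parts[1]
--     return seq_name, None
--
-- def find_duplicates_from_entries(sequence_entries):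
--     """
--     Find duplicate sequences from a list of sequence entries.
--
--     Args:
--         sequence_entries: List of (seq_name, seq_data) tuples
--
--     Returns:
--         tuple: (unique_sequences_dict, duplicate_indices)
--     """
--     seen_keys = {}
--     unique_sequences = {}
--     duplicate_indices = []
--
--     for idx, (seq_name, seq_data) in enumerate(sequence_entries):
--         accession, coords = parse_sequence_identifier(seq_name)
--         key = (accession, coords, seq_data)
--
--         if key not in seen_keys:
--             seen_keys[key] = idx
--             unique_sequences[seq_name] = seq_data
--         else:
--             duplicate_indices.append(idx)
--
--     return unique_sequences, duplicate_indices
-- ===== SOURCE B (Python) =====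
-- def find_duplicates_from_entries(sequence_entries):
--     # Two-pass group-by: first bucket every entry under its (accession, coords, seq_data)
--     # key, then emit the first member of each group as unique and all later members as
--     # duplicates, sorting the collected duplicate indices at the end.
--     groups = {}
--     for idx, (seq_name, seq_data) in enumerate(sequence_entries):
--         if '/' in seq_name:
--             accession, coords = seq_name.split('/', 1)
--         else:
--             accession, coords = seq_name, None
--         groups.setdefault((accession, coords, seq_data), []).append((idx, seq_name, seq_data))
--
--     unique_sequences = {}
--     duplicate_indices = []
--     for members in groups.values():
--         first = members[0]
--         unique_sequences[first[1]] = first[2]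
--         duplicate_indices.extend(m[0] for m in members[1:])
--     duplicate_indices.sort()
--     return unique_sequences, duplicate_indices
-- ===== Notes on version B (the rewrite author's own statement) =====
-- stated objective: idiomatic
-- what changed: A flags duplicates online in one pass with a seen-keys dict threaded beside two output accumulators; B is a two-pass group-by: it first buckets all entries per key with dict.setdefault, then emits each group's first member into unique_sequences and every later member's index as a duplicate, sorting the indices at the end.
import Mathlib
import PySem

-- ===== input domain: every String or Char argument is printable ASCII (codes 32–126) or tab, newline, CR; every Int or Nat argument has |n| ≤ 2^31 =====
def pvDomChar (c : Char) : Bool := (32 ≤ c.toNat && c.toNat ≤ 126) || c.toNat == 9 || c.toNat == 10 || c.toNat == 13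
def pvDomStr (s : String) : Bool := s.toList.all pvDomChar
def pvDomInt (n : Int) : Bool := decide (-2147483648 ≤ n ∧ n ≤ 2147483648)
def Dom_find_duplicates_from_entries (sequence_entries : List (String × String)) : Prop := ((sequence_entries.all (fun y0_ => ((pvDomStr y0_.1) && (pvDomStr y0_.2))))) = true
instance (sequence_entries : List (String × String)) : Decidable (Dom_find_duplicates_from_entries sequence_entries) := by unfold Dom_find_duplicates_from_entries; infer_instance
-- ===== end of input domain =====

-- B replaces A's online single pass (a seen-keys dict threaded beside two output
-- accumulators) by a two-pass group-by: bucket all entries per key first, then emit each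
-- group's first member as unique and the later members' indices as duplicates, sorting
-- the indices at the end.  Objective: idiomatic; same asymptotic cost.

-- ===== PORT A =====
-- parts[0] / parts[1]: when '/' is in seq_name, split('/', 1) yields exactly two parts, so the
-- getD default / the Option's some-side are the only sides reached; exact on every input.
def parse_sequence_identifier (seq_name : String) : String × Option String :=
  if PySem.Str.isIn "/" seq_name then
    let parts := (PySem.Str.splitMax? seq_name "/" 1).getD []
    (parts.getD 0 "", parts[1]?)
  else
    (seq_name, none)

def find_duplicates_from_entries (sequence_entries : List (String × String)) : (List (String × String)) × List Int :=
  let r := (PySem.List.enumerate sequence_entries 0).foldl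
    (fun (st : PySem.Dict (String × Option String × String) Int × PySem.Dict String String × List Int) p =>
      let ac := parse_sequence_identifier p.2.1
      let key := (ac.1, ac.2, p.2.2)
      if st.1.contains key = false then
        (st.1.insert key p.1, st.2.1.insert p.2.1 p.2.2, st.2.2)
      else
        (st.1, st.2.1, st.2.2 ++ [p.1]))
    (PySem.Dict.empty, PySem.Dict.empty, [])
  (r.2.1.items, r.2.2)

-- ===== PORT B =====
-- the inlined key computation of Source B's first loop
def pvEntryKey (e : String × String) : String × Option String × String :=
  if PySem.Str.isIn "/" e.1 then
    let parts := (PySem.Str.splitMax? e.1 "/" 1).getD []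
    (parts.getD 0 "", parts[1]?, e.2)
  else
    (e.1, none, e.2)

def find_duplicates_from_entries_alt (sequence_entries : List (String × String)) : (List (String × String)) × List Int :=
  -- first pass: groups.setdefault(key, []).append((idx, seq_name, seq_data))
  let groups := (PySem.List.enumerate sequence_entries 0).foldl
    (fun (g : PySem.Dict (String × Option String × String) (List (Int × String × String))) p =>
      g.modify (pvEntryKey p.2) [] (fun v => v ++ [(p.1, p.2)]))
    PySem.Dict.empty
  -- second pass over groups.values(); members[0] is total here since no group is ever []
  let r := groups.values.foldl
    (fun (st : PySem.Dict String String × List Int) members =>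
      match members with
      | [] => st
      | first :: rest => (st.1.insert first.2.1 first.2.2, st.2 ++ rest.map (·.1)))
    (PySem.Dict.empty, [])
  (r.1.items, PySem.List.sorted r.2 (fun x => x) false)

-- ===== PRECONDITION & SPEC =====
def Spec_find_duplicates_from_entries (sequence_entries : List (String × String)) (out : (List (String × String)) × List Int) : Prop := out = find_duplicates_from_entries_alt sequence_entries
instance (sequence_entries : List (String × String)) (out : (List (String × String)) × List Int) : Decidable (Spec_find_duplicates_from_entries sequence_entries out) := by unfold Spec_find_duplicates_from_entries; infer_instance

-- ===== CLAIM (what is proved, stated in full; the proofs are below) =====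
def Claim_equal_find_duplicates_from_entries : Prop := ∀ (sequence_entries : List (String × String)), Dom_find_duplicates_from_entries sequence_entries → Spec_find_duplicates_from_entries sequence_entries (find_duplicates_from_entries sequence_entries)

-- ===== LEMMAS AND PROOFS =====

theorem pvEntryKey_eq (e : String × String) :
    pvEntryKey e = ((parse_sequence_identifier e.1).1, (parse_sequence_identifier e.1).2, e.2) := by
  simp only [pvEntryKey, parse_sequence_identifier]
  split <;> rfl

-- ---- A's loop, characterised by first-occurrence flags ----

def pvStepA (st : PySem.Dict (String × Option String × String) Int × PySem.Dict String String × List Int)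
    (p : Int × (String × String)) :
    PySem.Dict (String × Option String × String) Int × PySem.Dict String String × List Int :=
  let ac := parse_sequence_identifier p.2.1
  let key := (ac.1, ac.2, p.2.2)
  if st.1.contains key = false then
    (st.1.insert key p.1, st.2.1.insert p.2.1 p.2.2, st.2.2)
  else
    (st.1, st.2.1, st.2.2 ++ [p.1])

def pvSA (l : List (String × String)) :
    PySem.Dict (String × Option String × String) Int × PySem.Dict String String × List Int :=
  (PySem.List.enumerate l 0).foldl pvStepA (PySem.Dict.empty, PySem.Dict.empty, [])

def pvFlags (l : List (String × String)) : List Bool :=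
  (PySem.List.enumerate (l.map pvEntryKey) 0).map
    (fun p => decide (p.2 ∈ PySem.List.slice (l.map pvEntryKey) none (some p.1)))

def pvDupsA (l : List (String × String)) : List Int :=
  ((PySem.List.enumerate (pvFlags l) 0).filter (fun p => p.2)).map (·.1)

def pvUniqA (l : List (String × String)) : PySem.Dict String String :=
  ((l.zip (pvFlags l)).filter (fun p => !p.2)).foldl
    (fun d p => d.insert p.1.1 p.1.2) (PySem.Dict.empty : PySem.Dict String String)

theorem pvFlags_length (l : List (String × String)) : (pvFlags l).length = l.length := by
  simp [pvFlags]

theorem pvFlags_append (l : List (String × String)) (x : String × String) :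
    pvFlags (l ++ [x]) = pvFlags l ++ [decide (pvEntryKey x ∈ l.map pvEntryKey)] := by
  unfold pvFlags
  rw [List.map_append, List.map_singleton, PySem.List.enumerate_append, List.map_append]
  congr 1
  · apply List.map_congr_left
    intro p hp
    obtain ⟨k, hk, rfl⟩ := (PySem.List.mem_enumerate_iff _ 0 p).mp hp
    simp only [zero_add, PySem.List.slice_to_natCast]
    rw [List.take_append_of_le_length (by simpa using le_of_lt hk)]
  · simp [PySem.List.enumerate_cons, PySem.List.slice_to_natCast]

theorem pvSA_append (l : List (String × String)) (x : String × String) :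
    pvSA (l ++ [x]) = pvStepA (pvSA l) ((l.length : Int), x) := by
  unfold pvSA
  rw [PySem.List.enumerate_append, List.foldl_append]
  simp [PySem.List.enumerate_cons]

theorem pvDupsA_append (l : List (String × String)) (x : String × String) :
    pvDupsA (l ++ [x]) = pvDupsA l ++
      (if pvEntryKey x ∈ l.map pvEntryKey then [(l.length : Int)] else []) := by
  unfold pvDupsA
  rw [pvFlags_append, PySem.List.enumerate_append, List.filter_append, List.map_append,
    pvFlags_length]
  congr 1
  by_cases h : pvEntryKey x ∈ l.map pvEntryKey <;>
    simp [PySem.List.enumerate_cons, h]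

theorem pvUniqA_append (l : List (String × String)) (x : String × String) :
    pvUniqA (l ++ [x]) = if pvEntryKey x ∈ l.map pvEntryKey then pvUniqA l
      else (pvUniqA l).insert x.1 x.2 := by
  unfold pvUniqA
  rw [pvFlags_append, List.zip_append (by simp [pvFlags_length]), List.filter_append,
    List.foldl_append]
  by_cases h : pvEntryKey x ∈ l.map pvEntryKey <;> simp [h]

theorem pvMainA (l : List (String × String)) :
    (∀ k, (pvSA l).1.contains k = decide (k ∈ l.map pvEntryKey))
    ∧ (pvSA l).2.1 = pvUniqA l ∧ (pvSA l).2.2 = pvDupsA l := by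
  induction l using List.reverseRecOn with
  | nil =>
    refine ⟨fun k => ?_, rfl, rfl⟩
    simp [pvSA, PySem.List.enumerate_nil, PySem.Dict.contains_empty]
  | append_singleton l x ih =>
    obtain ⟨h1, h2, h3⟩ := ih
    rw [pvSA_append, pvUniqA_append, pvDupsA_append]
    unfold pvStepA
    dsimp only
    rw [← pvEntryKey_eq x]
    by_cases h : pvEntryKey x ∈ List.map pvEntryKey l
    · rw [h1, decide_eq_true h, if_neg (show ¬(true = false) by simp), if_pos h, if_pos h]
      refine ⟨fun k => ?_, h2, by rw [h3]⟩
      rw [h1, List.map_append, List.map_singleton]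
      refine decide_eq_decide.mpr ?_
      simp only [List.mem_append, List.mem_singleton]
      constructor
      · exact Or.inl
      · rintro (hk | rfl)
        · exact hk
        · exact h
    · rw [h1, decide_eq_false h, if_pos rfl, if_neg h, if_neg h]
      refine ⟨fun k => ?_, by rw [h2], by rw [h3, List.append_nil]⟩
      rw [PySem.Dict.contains_insert, h1, List.map_append, List.map_singleton]
      by_cases hk : k = pvEntryKey x <;> by_cases hm : k ∈ List.map pvEntryKey l <;>
        simp [hk, hm, List.mem_append]

theorem pvDupsA_pairwise (l : List (String × String)) :
    (pvDupsA l).Pairwise (fun a b => a < b) := by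
  unfold pvDupsA
  rw [List.pairwise_map]
  exact ((PySem.List.pairwise_lt_enumerate (pvFlags l) 0).sublist
    List.filter_sublist).imp (fun h => h)

-- ---- B's pieces ----

def pvG (l : List (String × String)) :
    PySem.Dict (String × Option String × String) (List (Int × String × String)) :=
  (PySem.List.enumerate l 0).foldl
    (fun g p => g.modify (pvEntryKey p.2) [] (fun v => v ++ [(p.1, p.2)]))
    PySem.Dict.empty

def pvM (l : List (String × String)) (k : String × Option String × String) :
    List (Int × String × String) :=
  (PySem.List.enumerate l 0).filter (fun p => pvEntryKey p.2 == k)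

def pvK (l : List (String × String)) : List (String × Option String × String) :=
  PySem.Set.ofList (l.map pvEntryKey)

def pvF1 (d : PySem.Dict String String) (m : List (Int × String × String)) :
    PySem.Dict String String :=
  match m with
  | [] => d
  | first :: _ => d.insert first.2.1 first.2.2

def pvF2 (m : List (Int × String × String)) : List Int :=
  match m with
  | [] => []
  | _ :: rest => rest.map (·.1)

theorem pvG_getD (l : List (String × String)) (k : String × Option String × String) :
    (pvG l).getD k [] = pvM l k := by
  unfold pvG pvM
  have hmap : (PySem.List.enumerate l 0).foldl
        (fun g p => g.modify (pvEntryKey p.2) [] (fun v => v ++ [(p.1, p.2)]))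
        PySem.Dict.empty
      = ((PySem.List.enumerate l 0).map (fun p => (pvEntryKey p.2, p))).foldl
        (fun g q => g.modify q.1 [] (fun v => v ++ [q.2])) PySem.Dict.empty := by
    rw [List.foldl_map]
  rw [hmap]
  rw [PySem.Dict.getD_foldl_modify_append, PySem.Dict.getD_empty, List.filter_map]
  simp [Function.comp_def]

theorem pvG_keys (l : List (String × String)) : (pvG l).keys = pvK l := by
  unfold pvG pvK
  rw [PySem.Dict.keys_foldl_modify_key]
  rw [show (fun p : Int × (String × String) => pvEntryKey p.2) = pvEntryKey ∘ (·.2) from rfl,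
    ← List.map_map, PySem.List.map_snd_enumerate]
  rfl

theorem pvK_nodup (l : List (String × String)) : (pvK l).Nodup :=
  PySem.Set.nodup_ofList _

theorem pvK_mem (l : List (String × String)) (k : String × Option String × String) :
    k ∈ pvK l ↔ k ∈ l.map pvEntryKey := PySem.Set.mem_ofList _ _

theorem pvG_values (l : List (String × String)) :
    (pvG l).values = (pvK l).map (pvM l) := by
  rw [show (pvG l).values = (pvG l).keys.map (fun k => (pvG l).getD k [])
      from PySem.Dict.values_eq_map_keys _ (by rw [pvG_keys]; exact pvK_nodup l) _]
  rw [pvG_keys]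
  exact List.map_congr_left (fun k _ => pvG_getD l k)

theorem pvM_append (l : List (String × String)) (x : String × String)
    (k : String × Option String × String) :
    pvM (l ++ [x]) k
      = pvM l k ++ (if pvEntryKey x = k then [((l.length : Int), x)] else []) := by
  unfold pvM
  rw [PySem.List.enumerate_append, List.filter_append]
  congr 1
  by_cases h : pvEntryKey x = k <;> simp [PySem.List.enumerate_cons, h]

theorem pvM_ne_nil (l : List (String × String)) (k : String × Option String × String)
    (h : k ∈ l.map pvEntryKey) : pvM l k ≠ [] := by
  obtain ⟨y, hy, rfl⟩ := List.mem_map.mp h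
  obtain ⟨i, hi, rfl⟩ := List.mem_iff_getElem.mp hy
  refine List.ne_nil_of_mem (a := ((0 + i : Int), l[i])) ?_
  refine List.mem_filter.mpr ⟨?_, by simp⟩
  exact (PySem.List.mem_enumerate_iff _ 0 _).mpr ⟨i, hi, rfl⟩

theorem pvM_nil (l : List (String × String)) (k : String × Option String × String)
    (h : ¬ k ∈ l.map pvEntryKey) : pvM l k = [] := by
  refine List.filter_eq_nil_iff.mpr (fun p hp => ?_)
  obtain ⟨i, hi, rfl⟩ := (PySem.List.mem_enumerate_iff _ 0 p).mp hp
  simp only [beq_iff_eq]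
  intro he
  apply h
  rw [← he]
  exact List.mem_map_of_mem (List.getElem_mem hi)

theorem pvK_append (l : List (String × String)) (x : String × String) :
    pvK (l ++ [x]) = if pvEntryKey x ∈ l.map pvEntryKey then pvK l
      else pvK l ++ [pvEntryKey x] := by
  unfold pvK
  rw [List.map_append, List.map_singleton, PySem.Set.ofList_eq_foldl, List.foldl_append]
  rw [← PySem.Set.ofList_eq_foldl]
  simp only [List.foldl_cons, List.foldl_nil]
  by_cases h : pvEntryKey x ∈ l.map pvEntryKey
  · rw [if_pos h]
    simp [PySem.Set.add, PySem.Set.contains, (PySem.Set.mem_ofList _ _).mpr h]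
  · rw [if_neg h]
    have hne : ∀ a b, (a, b) ∈ l → ¬ pvEntryKey (a, b) = pvEntryKey x := by
      intro a b hab he
      exact h (he ▸ List.mem_map_of_mem hab)
    simp [PySem.Set.add, PySem.Set.contains]
    exact hne

-- B's unique-sequences fold equals A's
theorem pvUniq_eq (l : List (String × String)) :
    (pvK l).foldl (fun d k => pvF1 d (pvM l k)) PySem.Dict.empty = pvUniqA l := by
  induction l using List.reverseRecOn with
  | nil => rfl
  | append_singleton l x ih =>
    rw [pvK_append, pvUniqA_append]
    by_cases h : pvEntryKey x ∈ l.map pvEntryKey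
    · rw [if_pos h, if_pos h, ← ih]
      refine PySem.List.foldl_congr_mem _ _ _ _ (fun d k hk => ?_)
      rw [pvM_append]
      rcases hm : pvM l k with _ | ⟨f, rest⟩
      · exact absurd hm (pvM_ne_nil l k ((pvK_mem l k).mp hk))
      · simp [pvF1, List.cons_append]
    · rw [if_neg h, if_neg h, List.foldl_append, ← ih]
      have hcong : (pvK l).foldl (fun d k => pvF1 d (pvM (l ++ [x]) k)) PySem.Dict.empty
          = (pvK l).foldl (fun d k => pvF1 d (pvM l k)) PySem.Dict.empty := by
        refine PySem.List.foldl_congr_mem _ _ _ _ (fun d k hk => ?_)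
        have hxk : ¬ pvEntryKey x = k := fun he => h (by rw [he]; exact (pvK_mem l k).mp hk)
        rw [pvM_append, if_neg hxk, List.append_nil]
      rw [hcong]
      simp only [List.foldl_cons, List.foldl_nil]
      rw [pvM_append, if_pos rfl, pvM_nil l _ h, List.nil_append]
      rfl

-- helper: appending [n] into one group's tail is a permutation of appending it at the end
theorem pvFlatMapPerm {κ : Type} (K : List κ) (k0 : κ) (n : Int)
    (g g' : κ → List Int) (hnd : K.Nodup) (hk0 : k0 ∈ K)
    (h0 : g' k0 = g k0 ++ [n]) (hrest : ∀ k ∈ K, k ≠ k0 → g' k = g k) :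
    (K.flatMap g ++ [n]).Perm (K.flatMap g') := by
  induction K with
  | nil => cases hk0
  | cons a K ih =>
    rw [List.flatMap_cons, List.flatMap_cons]
    by_cases ha : a = k0
    · subst ha
      have hK : K.flatMap g' = K.flatMap g := by
        refine List.flatMap_congr (fun k hk => hrest k (List.mem_cons_of_mem _ hk) ?_)
        exact fun he => (List.nodup_cons.mp hnd).1 (he ▸ hk)
      rw [h0, hK, List.append_assoc, List.append_assoc]
      exact (List.Perm.append_left (g a) (List.perm_append_comm))
    · have hk0' : k0 ∈ K := (List.mem_cons.mp hk0).resolve_left (fun he => ha he.symm)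
      rw [hrest a (List.mem_cons_self) ha, List.append_assoc]
      exact List.Perm.append_left (g a)
        (ih (List.nodup_cons.mp hnd).2 hk0'
          (fun k hk hne => hrest k (List.mem_cons_of_mem _ hk) hne))

-- B's duplicate indices (before the final sort) are a permutation of A's
theorem pvDups_perm (l : List (String × String)) :
    (pvDupsA l).Perm ((pvK l).flatMap (fun k => pvF2 (pvM l k))) := by
  induction l using List.reverseRecOn with
  | nil => rfl
  | append_singleton l x ih =>
    rw [pvK_append, pvDupsA_append]
    by_cases h : pvEntryKey x ∈ l.map pvEntryKey
    · rw [if_pos h, if_pos h]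
      refine (ih.append_right [(l.length : Int)]).trans ?_
      refine pvFlatMapPerm (pvK l) (pvEntryKey x) (l.length : Int) _ _
        (pvK_nodup l) ((pvK_mem l _).mpr h) ?_ ?_
      · rw [pvM_append, if_pos rfl]
        rcases hm : pvM l (pvEntryKey x) with _ | ⟨f, rest⟩
        · exact absurd hm (pvM_ne_nil l _ h)
        · simp [pvF2, List.cons_append]
      · intro k _ hne
        rw [pvM_append, if_neg (fun he => hne he.symm), List.append_nil]
    · rw [if_neg h, if_neg h, List.append_nil, List.flatMap_append]
      have hcong : (pvK l).flatMap (fun k => pvF2 (pvM (l ++ [x]) k))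
          = (pvK l).flatMap (fun k => pvF2 (pvM l k)) := by
        refine List.flatMap_congr (fun k hk => ?_)
        have hxk : ¬ pvEntryKey x = k := fun he => h (by rw [he]; exact (pvK_mem l k).mp hk)
        rw [pvM_append, if_neg hxk, List.append_nil]
      rw [hcong, List.flatMap_cons, List.flatMap_nil]
      rw [pvM_append, if_pos rfl, pvM_nil l _ h, List.nil_append]
      simpa [pvF2] using ih

-- the second fold of B's port splits into its two independent components
theorem pvSecondFold (V : List (List (Int × String × String)))
    (d : PySem.Dict String String) (s : List Int) :
    V.foldl
      (fun (st : PySem.Dict String String × List Int) members =>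
        match members with
        | [] => st
        | first :: rest => (st.1.insert first.2.1 first.2.2, st.2 ++ rest.map (·.1)))
      (d, s)
    = (V.foldl pvF1 d, V.foldl (fun acc m => acc ++ pvF2 m) s) := by
  induction V generalizing d s with
  | nil => rfl
  | cons m V ih =>
    rw [List.foldl_cons, List.foldl_cons, List.foldl_cons]
    rcases m with _ | ⟨f, rest⟩
    · rw [show s ++ pvF2 [] = s from by simp [pvF2]]
      exact ih d s
    · exact ih _ _

-- ===== VERDICT (by name: the statement is the Claim_ definition above) =====
theorem find_duplicates_from_entries_spec : Claim_equal_find_duplicates_from_entries := by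
  intro l _
  show find_duplicates_from_entries l = find_duplicates_from_entries_alt l
  have ha : find_duplicates_from_entries l = ((pvSA l).2.1.items, (pvSA l).2.2) := rfl
  obtain ⟨-, h2, h3⟩ := pvMainA l
  rw [ha, h2, h3]
  show ((pvUniqA l).items, pvDupsA l)
    = (((pvG l).values.foldl _ (PySem.Dict.empty, [])).1.items,
       PySem.List.sorted ((pvG l).values.foldl _ (PySem.Dict.empty, [])).2 (fun x => x) false)
  rw [pvG_values, pvSecondFold, List.foldl_map,
    show ((pvK l).map (pvM l)).foldl (fun acc m => acc ++ pvF2 m) [] =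
      [] ++ ((pvK l).map (pvM l)).flatMap pvF2 from PySem.List.foldl_append_eq_flatMap _ _ _,
    List.nil_append, List.flatMap_map, pvUniq_eq]
  congr 1
  exact (PySem.List.sorted_eq_of_perm_of_pairwise_lt _ _ _
    (pvDups_perm l) (pvDupsA_pairwise l)).symm
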